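-- pv_equiv track=rewrite | github.com/Vizze24/FPY1101_ET | VicenteCossio_FPY1101-008D_ET.py | masalto
-- ===== SOURCE A (Python) =====
-- def masalto(trabajadores2):
--     producto_mas_caro = None
--     precio_mas_alto = 0
--     for trabajadores23 in trabajadores2:
--         if trabajadores23[1] > precio_mas_alto:
--             precio_mas_alto = trabajadores23[1]
--             producto_mas_caro = trabajadores23
--     return producto_mas_caro
-- ===== SOURCE B (Python) =====
-- def masalto(trabajadores2):
--     orden = sorted(trabajadores2, key=lambda t: t[1], reverse=True)
--     if orden and orden[0][1] > 0:
--         return orden[0]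
--     return None
-- ===== Notes on version B (the rewrite author's own statement) =====
-- stated objective: alternative
-- what changed: Replaces the single-pass best-so-far scan by a stable descending sort on the second component followed by picking the head if it is strictly positive (stability makes the head the first maximal element, matching A's first-wins tie-breaking), else None.
import Mathlib
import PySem

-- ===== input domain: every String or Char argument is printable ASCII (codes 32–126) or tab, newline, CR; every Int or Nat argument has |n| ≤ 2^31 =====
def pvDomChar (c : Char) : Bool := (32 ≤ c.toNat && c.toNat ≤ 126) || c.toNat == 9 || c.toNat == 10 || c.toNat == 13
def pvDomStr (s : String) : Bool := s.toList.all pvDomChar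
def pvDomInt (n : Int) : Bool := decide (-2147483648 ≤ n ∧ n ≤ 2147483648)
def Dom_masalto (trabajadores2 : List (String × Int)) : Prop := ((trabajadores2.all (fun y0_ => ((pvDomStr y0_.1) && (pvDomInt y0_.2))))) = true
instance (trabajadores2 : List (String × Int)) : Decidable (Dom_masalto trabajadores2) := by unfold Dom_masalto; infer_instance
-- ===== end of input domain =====

-- B replaces A's single-pass best-so-far scan by a stable descending sort on the
-- second component followed by taking the head if strictly positive; objective: alternative.

-- ===== PORT A =====
-- A's loop over trabajadores2 carrying (producto_mas_caro, precio_mas_alto)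
def masaltoLoop : List (String × Int) → Option (String × Int) → Int → Option (String × Int)
  | [], producto, _ => producto
  | t :: rest, producto, precio =>
      if t.2 > precio then masaltoLoop rest (some t) t.2
      else masaltoLoop rest producto precio

def masalto (trabajadores2 : List (String × Int)) : Option (String × Int) :=
  masaltoLoop trabajadores2 none 0

-- ===== PORT B =====
-- orden = sorted(trabajadores2, key=lambda t: t[1], reverse=True);
-- if orden and orden[0][1] > 0: return orden[0]; return None
def masalto_alt (trabajadores2 : List (String × Int)) : Option (String × Int) :=
  match PySem.List.sorted trabajadores2 (fun t => t.2) true with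
  | [] => none
  | h :: _ => if h.2 > 0 then some h else none

-- ===== PRECONDITION & SPEC =====
def Spec_masalto (trabajadores2 : List (String × Int)) (out : Option (String × Int)) : Prop := out = masalto_alt trabajadores2
instance (trabajadores2 : List (String × Int)) (out : Option (String × Int)) : Decidable (Spec_masalto trabajadores2 out) := by unfold Spec_masalto; infer_instance

-- ===== CLAIM (what is proved, stated in full; the proofs are below) =====
def Claim_equal_masalto : Prop := ∀ (trabajadores2 : List (String × Int)), Dom_masalto trabajadores2 → Spec_masalto trabajadores2 (masalto trabajadores2)

-- ===== LEMMAS AND PROOFS =====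

-- the best-so-far step of A's loop once a best element is held
def pvStep (b x : String × Int) : String × Int := if x.2 > b.2 then x else b

-- the head of the insertion performed by the stable reverse sort evolves exactly by pvStep
theorem head_insertBy (x : String × Int) (acc : List (String × Int)) (h : String × Int)
    (hacc : acc.head? = some h) :
    (PySem.List.insertBy (fun a b => decide ((fun t : String × Int => t.2) b < (fun t : String × Int => t.2) a)) x acc).head? = some (pvStep h x) := by
  cases acc with
  | nil => simp at hacc
  | cons y ys =>
      rw [List.head?_cons] at hacc
      injection hacc with he
      subst he
      by_cases hb : x.2 > y.2 <;> simp [PySem.List.insertBy, pvStep, hb]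

-- the head of the reverse-sort fold over l seeded with a nonempty accumulator
theorem head_foldl_insertBy (l : List (String × Int)) : ∀ (acc : List (String × Int)) (h : String × Int),
    acc.head? = some h →
    (l.foldl (fun acc x => PySem.List.insertBy (fun a b => decide ((fun t : String × Int => t.2) b < (fun t : String × Int => t.2) a)) x acc) acc).head?
      = some (l.foldl pvStep h) := by
  induction l with
  | nil => intro acc h hacc; simpa using hacc
  | cons x rest ih =>
      intro acc h hacc
      simp only [List.foldl]
      exact ih _ (pvStep h x) (head_insertBy x acc h hacc)

-- the head of the stable reverse sort of x :: xs is the best-so-far fold seeded with x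
theorem head_sorted_rev (x : String × Int) (xs : List (String × Int)) :
    (PySem.List.sorted (x :: xs) (fun t => t.2) true).head? = some (xs.foldl pvStep x) := by
  rw [PySem.List.sorted_rev_eq_foldl_insertBy]
  simp only [List.foldl]
  exact head_foldl_insertBy xs _ x (by simp [PySem.List.insertBy])

-- the best-so-far fold never decreases the held value
theorem le_foldl_pvStep (xs : List (String × Int)) : ∀ b : String × Int, b.2 ≤ (xs.foldl pvStep b).2 := by
  induction xs with
  | nil => intro b; simp
  | cons y ys ih =>
      intro b
      by_cases hy : y.2 > b.2
      · simpa [pvStep, hy] using le_trans (le_of_lt hy) (ih y)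
      · simpa [pvStep, hy] using ih b

-- with two nonpositive seeds, the folds agree or both stay nonpositive
theorem foldl_pvStep_nonpos (ys : List (String × Int)) : ∀ x y : String × Int, y.2 ≤ x.2 → x.2 ≤ 0 →
    ys.foldl pvStep x = ys.foldl pvStep y ∨ ((ys.foldl pvStep x).2 ≤ 0 ∧ (ys.foldl pvStep y).2 ≤ 0) := by
  induction ys with
  | nil => intro x y hyx hx; right; exact ⟨hx, le_trans hyx hx⟩
  | cons z zs ih =>
      intro x y hyx hx
      by_cases hzx : z.2 > x.2
      · have hzy : z.2 > y.2 := lt_of_le_of_lt hyx hzx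
        left; simp [pvStep, List.foldl, hzx, hzy]
      · by_cases hzy : z.2 > y.2
        · simpa [pvStep, List.foldl, hzx, hzy] using ih x z (by omega) hx
        · simpa [pvStep, List.foldl, hzx, hzy] using ih x y hyx hx

-- once A's loop holds a best m with precio = m.2, it computes the best-so-far fold
theorem masaltoLoop_some (xs : List (String × Int)) : ∀ m : String × Int,
    masaltoLoop xs (some m) m.2 = some (xs.foldl pvStep m) := by
  induction xs with
  | nil => intro m; simp [masaltoLoop]
  | cons x rest ih =>
      intro m
      by_cases hx : x.2 > m.2 <;> simp [masaltoLoop, pvStep, hx, ih]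

-- from the initial state, A's loop returns the fold's best iff its value is positive
theorem masaltoLoop_none (l : List (String × Int)) :
    masaltoLoop l none 0 =
      match l with
      | [] => none
      | x :: xs => if (xs.foldl pvStep x).2 > 0 then some (xs.foldl pvStep x) else none := by
  induction l with
  | nil => simp [masaltoLoop]
  | cons x xs ih =>
      by_cases hx : x.2 > 0
      · have hpos : (xs.foldl pvStep x).2 > 0 := lt_of_lt_of_le hx (le_foldl_pvStep xs x)
        simp [masaltoLoop, hx, masaltoLoop_some, hpos]
      · have hx' : x.2 ≤ 0 := by omega
        simp only [masaltoLoop, hx, ih]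
        cases xs with
        | nil => simp [hx]
        | cons y ys =>
            by_cases hyx : y.2 > x.2
            · simp [List.foldl, pvStep, hyx]
            · have := foldl_pvStep_nonpos ys x y (by omega) hx'
              rcases this with heq | ⟨h1, h2⟩
              · simp [List.foldl, pvStep, hyx, heq]
              · simp only [List.foldl, pvStep, hyx]
                simp only [show ¬ ((ys.foldl pvStep x).2 > 0) by omega,
                           show ¬ ((ys.foldl pvStep y).2 > 0) by omega, if_false]

-- ===== VERDICT (by name: the statement is the Claim_ definition above) =====
theorem masalto_spec : Claim_equal_masalto := by
  intro l _
  show masalto l = masalto_alt l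
  cases l with
  | nil => rfl
  | cons x xs =>
      have hh := head_sorted_rev x xs
      unfold masalto masalto_alt
      rw [masaltoLoop_none]
      cases hs : PySem.List.sorted (x :: xs) (fun t => t.2) true with
      | nil => simp [hs] at hh
      | cons h t =>
          rw [hs] at hh
          simp at hh
          subst hh
          rfl
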